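-- pv_equiv track=rewrite | github.com/Michael-Sebero/Numerology-Calculator | calculators/calendar-calculator.py | method_hebrew_standard
-- ===== SOURCE A (Python) =====
-- def reduce_to_single_digit(n):
--     """Mispar katan mispari: repeatedly sum digits until 1-9."""
--     while n > 9:
--         n = sum(int(d) for d in str(n))
--     return n
--
-- def method_hebrew_standard(month, day, year):
--     """
--     Method 2 — Hebrew Standard (Mispar Hechrachi).
--     Same arithmetic as Method 1 but preserves documented sacred sums
--     13 (Echad / divine mercy), 18 (Chai / life), 26 (YHVH) before
--     any final reduction.
--     Returns (r_month, r_day, r_year, raw_sum, final).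
--     """
--     rm = reduce_to_single_digit(month)
--     rd = reduce_to_single_digit(day)
--     ry = reduce_to_single_digit(sum(int(d) for d in str(year)))
--     raw = rm + rd + ry
--     if raw in {13, 18, 26}:
--         return rm, rd, ry, raw, raw          # preserve the sacred value
--     return rm, rd, ry, raw, reduce_to_single_digit(raw)
-- ===== SOURCE B (Python) =====
-- def _digital_root(n):
--     """Closed-form digital root; values <= 9 (incl. 0 and negatives) pass through."""
--     return n if n <= 9 else (n - 1) % 9 + 1
--
-- def method_hebrew_standard(month, day, year):
--     rm = _digital_root(month)
--     rd = _digital_root(day)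
--     ry = _digital_root(year)
--     raw = rm + rd + ry
--     final = raw if raw in (13, 18, 26) else _digital_root(raw)
--     return rm, rd, ry, raw, final
-- ===== Notes on version B (the rewrite author's own statement) =====
-- stated objective: simpler
-- what changed: The repeated digit-sum loop (and the explicit digit sum of the year) is replaced by the constant-time digital-root closed form n if n <= 9 else (n - 1) % 9 + 1, applied directly to month, day, year and the raw sum.
import Mathlib
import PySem

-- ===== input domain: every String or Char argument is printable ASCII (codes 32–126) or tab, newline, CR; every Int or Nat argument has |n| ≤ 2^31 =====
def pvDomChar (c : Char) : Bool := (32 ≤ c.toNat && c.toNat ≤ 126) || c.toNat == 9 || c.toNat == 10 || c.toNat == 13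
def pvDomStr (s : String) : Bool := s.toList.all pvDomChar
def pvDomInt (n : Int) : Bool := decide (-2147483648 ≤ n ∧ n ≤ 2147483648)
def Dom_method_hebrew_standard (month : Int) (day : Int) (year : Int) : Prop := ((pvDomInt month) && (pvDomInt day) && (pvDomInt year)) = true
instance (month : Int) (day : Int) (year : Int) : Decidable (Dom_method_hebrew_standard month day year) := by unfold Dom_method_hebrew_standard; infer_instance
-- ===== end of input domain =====

-- B replaces A's repeated digit-sum loop by the constant-time digital-root closed form (objective: simpler).

-- ===== PORT A =====
-- int(d) for a single character d; total form (.getD 0) — Pre_ excludes year < 0,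
-- the only admitted input on which a non-digit character ('-') reaches int() and Python raises.
def pvVal (c : Char) : Int := (PySem.Int.ofChars? [c]).getD 0

-- sum(int(d) for d in str(n))
def pvDigitSum (n : Int) : Int := ((PySem.Int.toChars n).map pvVal).sum

-- the 'while n > 9' loop; fuel n.toNat suffices because each executed iteration
-- strictly decreases the (then positive) value of n, so the port is exact.
def pvReduceLoop : Nat → Int → Int
  | 0, n => n
  | f + 1, n => if 9 < n then pvReduceLoop f (pvDigitSum n) else n

def reduce_to_single_digit (n : Int) : Int := pvReduceLoop n.toNat n

def method_hebrew_standard (month : Int) (day : Int) (year : Int) : Int × Int × Int × Int × Int :=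
  let rm := reduce_to_single_digit month
  let rd := reduce_to_single_digit day
  let ry := reduce_to_single_digit (pvDigitSum year)
  let raw := rm + rd + ry
  if raw = 13 ∨ raw = 18 ∨ raw = 26 then (rm, rd, ry, raw, raw)
  else (rm, rd, ry, raw, reduce_to_single_digit raw)

-- ===== PORT B =====
def pvDr (n : Int) : Int := if n ≤ 9 then n else PySem.Int.mod (n - 1) 9 + 1

def method_hebrew_standard_alt (month : Int) (day : Int) (year : Int) : Int × Int × Int × Int × Int :=
  let rm := pvDr month
  let rd := pvDr day
  let ry := pvDr year
  let raw := rm + rd + ry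
  let final := if raw = 13 ∨ raw = 18 ∨ raw = 26 then raw else pvDr raw
  (rm, rd, ry, raw, final)

-- ===== PRECONDITION & SPEC =====
-- Pre_ excludes year < 0, on which A raises ValueError (the '-' of str(year) is fed to int()).
def Pre_method_hebrew_standard (month : Int) (day : Int) (year : Int) : Prop := 0 ≤ year
instance (month : Int) (day : Int) (year : Int) : Decidable (Pre_method_hebrew_standard month day year) := by unfold Pre_method_hebrew_standard; infer_instance
def pvWitness_method_hebrew_standard : Int × Int × Int := (12, 31, 1999)

def Spec_method_hebrew_standard (month : Int) (day : Int) (year : Int) (out : Int × Int × Int × Int × Int) : Prop := out = method_hebrew_standard_alt month day year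
instance (month : Int) (day : Int) (year : Int) (out : Int × Int × Int × Int × Int) : Decidable (Spec_method_hebrew_standard month day year out) := by unfold Spec_method_hebrew_standard; infer_instance

-- ===== CLAIM (what is proved, stated in full; the proofs are below) =====
def Claim_equal_method_hebrew_standard : Prop := ∀ (month : Int) (day : Int) (year : Int), Dom_method_hebrew_standard month day year → Pre_method_hebrew_standard month day year → Spec_method_hebrew_standard month day year (method_hebrew_standard month day year)

-- ===== LEMMAS AND PROOFS =====

theorem pvVal_digitChar (k : Nat) (hk : k < 10) : pvVal (Nat.digitChar k) = (k : Int) := by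
  interval_cases k <;> rfl

theorem pvSum_toDigitsCore (fuel : Nat) : ∀ (m : Nat) (acc : List Char), m < fuel →
    ((Nat.toDigitsCore 10 fuel m acc).map pvVal).sum
      = ((Nat.digits 10 m).sum : Int) + ((acc.map pvVal).sum) := by
  induction fuel with
  | zero => intro m acc h; omega
  | succ f ih =>
    intro m acc h
    rw [Nat.toDigitsCore]
    by_cases h0 : m / 10 = 0
    · simp only [h0]
      rcases Nat.eq_zero_or_pos m with hm | hm
      · subst hm
        simp [pvVal_digitChar 0 (by norm_num)]
      · rw [Nat.digits_def' (by norm_num : 1 < 10) hm, h0]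
        simp [pvVal_digitChar (m % 10) (Nat.mod_lt _ (by norm_num))]
    · simp only [if_neg h0]
      have hm : 0 < m := by
        rcases Nat.eq_zero_or_pos m with hm | hm
        · subst hm; simp at h0
        · exact hm
      have hlt : m / 10 < f := by
        have := Nat.div_lt_self hm (by norm_num : 1 < 10)
        omega
      rw [ih (m / 10) _ hlt]
      rw [Nat.digits_def' (by norm_num : 1 < 10) hm]
      simp only [List.map_cons, List.sum_cons,
        pvVal_digitChar (m % 10) (Nat.mod_lt _ (by norm_num))]
      push_cast
      ring

theorem pvDigitSum_natCast (m : Nat) : pvDigitSum (m : Int) = ((Nat.digits 10 m).sum : Int) := by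
  unfold pvDigitSum
  rw [show PySem.Int.toChars (m : Int) = Nat.toDigits 10 m by
        simp [PySem.Int.toChars]]
  unfold Nat.toDigits
  rw [pvSum_toDigitsCore (m + 1) m [] (by omega)]
  simp

theorem pvDigitSum_mod9 (m : Nat) : pvDigitSum (m : Int) % 9 = (m : Int) % 9 := by
  rw [pvDigitSum_natCast]
  have h : m % 9 = (Nat.digits 10 m).sum % 9 := Nat.modEq_nine_digits_sum m
  have h2 := congrArg (Nat.cast : Nat → Int) h
  push_cast at h2
  omega

theorem pvDigitSum_lt (m : Nat) (hm : 10 ≤ m) : pvDigitSum (m : Int) < (m : Int) := by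
  rw [pvDigitSum_natCast]
  have hnat : (Nat.digits 10 m).sum < m := by
    rw [Nat.digits_def' (by norm_num : 1 < 10) (by omega : 0 < m), List.sum_cons]
    have h1 : (Nat.digits 10 (m / 10)).sum ≤ m / 10 := Nat.digit_sum_le 10 (m / 10)
    omega
  exact_mod_cast hnat

theorem pvDigitSum_pos (m : Nat) (hm : 0 < m) : 0 < pvDigitSum (m : Int) := by
  rw [pvDigitSum_natCast]
  have hmem : (Nat.digits 10 m).getLast (Nat.digits_ne_nil_iff_ne_zero.mpr (by omega)) ∈ Nat.digits 10 m :=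
    List.getLast_mem _
  have hne : (Nat.digits 10 m).getLast (Nat.digits_ne_nil_iff_ne_zero.mpr (by omega)) ≠ 0 :=
    Nat.getLast_digit_ne_zero 10 (by omega)
  have hle := List.single_le_sum (l := Nat.digits 10 m) (fun x _ => Nat.zero_le x) _ hmem
  have : 0 < (Nat.digits 10 m).sum := by omega
  exact_mod_cast this

theorem pvDr_mod (n : Int) (hn : 0 < n) : pvDr n = (n - 1) % 9 + 1 := by
  unfold pvDr
  split_ifs with h
  · have h9 : (n - 1) % 9 = n - 1 := Int.emod_eq_of_lt (by omega) (by omega)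
    omega
  · simp [PySem.Int.mod, Int.fmod_eq_emod]

theorem pvDr_congr (a b : Int) (ha : 0 < a) (hb : 0 < b) (h : a % 9 = b % 9) : pvDr a = pvDr b := by
  rw [pvDr_mod a ha, pvDr_mod b hb]
  have : (a - 1) % 9 = (b - 1) % 9 := by
    omega
  rw [this]

theorem pvReduceLoop_eq_dr : ∀ (fuel : Nat) (n : Int), 0 ≤ n → n ≤ (fuel : Int) → pvReduceLoop fuel n = pvDr n := by
  intro fuel
  induction fuel with
  | zero =>
    intro n h0 h1
    have : n = 0 := by omega
    subst this; rfl
  | succ f ih =>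
    intro n h0 h1
    rw [pvReduceLoop]
    split_ifs with h9
    · have hn : 0 < n := by omega
      have hten : (10 : Int) ≤ n := by omega
      have hm : n = ((n.toNat : Nat) : Int) := by omega
      have hds_lt : pvDigitSum n < n := by
        rw [hm]; exact pvDigitSum_lt n.toNat (by omega)
      have hds_pos : 0 < pvDigitSum n := by
        rw [hm]; exact pvDigitSum_pos n.toNat (by omega)
      have hds_mod : pvDigitSum n % 9 = n % 9 := by
        rw [hm]; exact pvDigitSum_mod9 n.toNat
      rw [ih (pvDigitSum n) (by omega) (by omega)]
      exact pvDr_congr _ _ hds_pos hn hds_mod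
    · simp [pvDr, not_lt.mp h9]

theorem pvReduce_eq_dr (n : Int) : reduce_to_single_digit n = pvDr n := by
  unfold reduce_to_single_digit
  by_cases h : 9 < n
  · exact pvReduceLoop_eq_dr n.toNat n (by omega) (by omega)
  · have hdr : pvDr n = n := by simp [pvDr, not_lt.mp h]
    rw [hdr]
    cases hfuel : n.toNat with
    | zero => rfl
    | succ f => rw [pvReduceLoop, if_neg h]

theorem pvReduce_digitSum (y : Int) (hy : 0 ≤ y) : reduce_to_single_digit (pvDigitSum y) = pvDr y := by
  have hm : y = ((y.toNat : Nat) : Int) := by omega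
  rw [pvReduce_eq_dr]
  rcases eq_or_lt_of_le hy with h0 | hpos
  · rw [← h0]; rfl
  · apply pvDr_congr
    · rw [hm]; exact pvDigitSum_pos y.toNat (by omega)
    · exact hpos
    · rw [hm]; exact pvDigitSum_mod9 y.toNat

-- ===== VERDICT (by name: the statement is the Claim_ definition above) =====
theorem method_hebrew_standard_spec : Claim_equal_method_hebrew_standard := by
  intro month day year _ hpre
  unfold Spec_method_hebrew_standard method_hebrew_standard method_hebrew_standard_alt
  rw [pvReduce_digitSum year hpre]
  simp only [pvReduce_eq_dr]
  split_ifs <;> rfl
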